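-- pv_equiv track=rewrite | github.com/8igMac/collocation | collocation/utils.py | _seg_list
-- ===== SOURCE A (Python) =====
-- def _seg_list(words, sep):
--     segs = list()
--     prev = 0
--     for i, word in enumerate(words):
--         if word in sep:
--             if prev != i:
--                 segs.append(words[prev:i])
--             prev = i + 1
--     return segs
-- ===== SOURCE B (Python) =====
-- def _seg_list(words, sep):
--     seps = set(sep)
--     segs = []
--     lo = 0
--     n = len(words)
--     while lo < n:
--         hi = lo
--         while hi < n and words[hi] not in seps:
--             hi += 1
--         if hi == n:
--             return segs
--         if hi > lo:
--             segs.append(words[lo:hi])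
--         lo = hi + 1
--     return segs
-- ===== Notes on version B (the rewrite author's own statement) =====
-- stated objective: alternative
-- what changed: B replaces A's single enumerate loop with index bookkeeping by a two-pointer scan: an inner loop advances hi to the next separator, the outer loop slices [lo:hi] and jumps lo past it, with separator membership tested against a prebuilt set.
import Mathlib
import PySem

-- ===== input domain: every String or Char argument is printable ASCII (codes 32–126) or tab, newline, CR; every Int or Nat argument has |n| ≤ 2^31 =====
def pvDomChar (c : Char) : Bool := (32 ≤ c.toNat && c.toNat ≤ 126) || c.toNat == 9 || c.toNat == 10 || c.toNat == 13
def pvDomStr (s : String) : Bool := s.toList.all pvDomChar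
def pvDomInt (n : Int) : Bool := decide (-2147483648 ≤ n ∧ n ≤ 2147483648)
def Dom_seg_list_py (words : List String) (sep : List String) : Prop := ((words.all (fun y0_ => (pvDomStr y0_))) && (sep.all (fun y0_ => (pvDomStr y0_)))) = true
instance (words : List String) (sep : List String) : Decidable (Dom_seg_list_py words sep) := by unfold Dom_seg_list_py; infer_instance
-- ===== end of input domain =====

-- B replaces A's enumerate-and-track-prev loop by a two-pointer scan (inner loop finds the
-- next separator, outer loop slices and skips); an alternative of the same cost.

-- ===== PORT A =====
-- loop body of A: state is (segs, prev); enumerate(words) gives (word, index) pairs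
def segA_step (words : List String) (sep : List String)
    (st : List (List String) × Nat) (p : String × Nat) : List (List String) × Nat :=
  if sep.contains p.1 then
    (if st.2 ≠ p.2 then st.1 ++ [PySem.List.slice words (some (st.2 : Int)) (some (p.2 : Int))] else st.1,
     p.2 + 1)
  else st

def seg_list_py (words : List String) (sep : List String) : List (List String) :=
  ((words.zipIdx).foldl (segA_step words sep) ([], 0)).1

-- ===== PORT B =====
-- inner while loop: advance hi while hi < n and words[hi] not in seps
-- (structural recursion on a fuel counter that merely totalises the loop; Python's
--  words[hi] is in range at every read, so List.getD is exact)
def segHi (words : List String) (seps : List String) : Nat → Nat → Nat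
  | 0, hi => hi
  | fuel + 1, hi =>
    if hi < words.length ∧ ¬ seps.contains (words.getD hi "") = true then
      segHi words seps fuel (hi + 1)
    else hi

-- outer while loop: state is (segs, lo); fuel again only totalises the loop
def segOut (words : List String) (seps : List String) : Nat → List (List String) → Nat → List (List String)
  | 0, segs, _ => segs
  | fuel + 1, segs, lo =>
    if lo < words.length then
      let hi := segHi words seps words.length lo
      if hi = words.length then segs
      else segOut words seps fuel
        (if lo < hi then segs ++ [PySem.List.slice words (some (lo : Int)) (some (hi : Int))] else segs)
        (hi + 1)
    else segs

def seg_list_py_alt (words : List String) (sep : List String) : List (List String) :=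
  segOut words (PySem.Set.ofList sep) (words.length + 1) [] 0

-- ===== PRECONDITION & SPEC =====
def Spec_seg_list_py (words : List String) (sep : List String) (out : List (List String)) : Prop := out = seg_list_py_alt words sep
instance (words : List String) (sep : List String) (out : List (List String)) : Decidable (Spec_seg_list_py words sep out) := by unfold Spec_seg_list_py; infer_instance

-- ===== CLAIM (what is proved, stated in full; the proofs are below) =====
def Claim_equal_seg_list_py : Prop := ∀ (words : List String) (sep : List String), Dom_seg_list_py words sep → Spec_seg_list_py words sep (seg_list_py words sep)

-- ===== LEMMAS AND PROOFS =====

-- segHi never moves the pointer backwards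
theorem segHi_ge (words seps : List String) :
    ∀ (fuel hi : Nat), hi ≤ segHi words seps fuel hi := by
  intro fuel
  induction fuel with
  | zero => intro hi; simp [segHi]
  | succ f ih =>
    intro hi
    rw [segHi]
    split
    · exact Nat.le_trans (Nat.le_succ hi) (ih (hi + 1))
    · exact Nat.le_refl hi

-- the pointer segHi stays within bounds
theorem segHi_le (words seps : List String) :
    ∀ (fuel hi : Nat), hi ≤ words.length → segHi words seps fuel hi ≤ words.length := by
  intro fuel
  induction fuel with
  | zero => intro hi h; simpa [segHi] using h
  | succ f ih =>
    intro hi h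
    rw [segHi]
    split
    · next hc => exact ih (hi + 1) (by omega)
    · exact h

-- segHi stops on a separator or at the end of the list
theorem segHi_stop (words seps : List String) (hi : Nat)
    (h : seps.contains (words.getD hi "") = true ∨ words.length ≤ hi) :
    ∀ fuel, segHi words seps fuel hi = hi := by
  intro fuel
  cases fuel with
  | zero => rfl
  | succ f =>
    rw [segHi, if_neg]
    rintro ⟨h1, h2⟩
    rcases h with h | h
    · exact h2 h
    · omega

-- enough fuel makes segHi fuel-independent
theorem segHi_fuel (words seps : List String) :
    ∀ (f f' hi : Nat), words.length - hi ≤ f → words.length - hi ≤ f' →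
      segHi words seps f hi = segHi words seps f' hi := by
  intro f
  induction f with
  | zero =>
    intro f' hi hf hf'
    rw [show segHi words seps 0 hi = hi from rfl,
        segHi_stop words seps hi (Or.inr (by omega)) f']
  | succ f ih =>
    intro f' hi hf hf'
    cases f' with
    | zero =>
      rw [show segHi words seps 0 hi = hi from rfl,
          segHi_stop words seps hi (Or.inr (by omega)) (f + 1)]
    | succ f' =>
      rw [segHi, segHi]
      split
      · next hc => exact ih f' (hi + 1) (by omega) (by omega)
      · rfl

-- segHi with full fuel advances across a non-separator
theorem segHi_go (words seps : List String) (hi : Nat)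
    (h1 : hi < words.length) (h2 : ¬ seps.contains (words.getD hi "") = true) :
    segHi words seps words.length hi = segHi words seps words.length (hi + 1) := by
  obtain ⟨f, hf⟩ : ∃ f, words.length = f + 1 := ⟨words.length - 1, by omega⟩
  conv_lhs => rw [hf, segHi, if_pos ⟨h1, h2⟩]
  exact segHi_fuel words seps f words.length (hi + 1) (by omega) (by omega)

-- proof-only intermediate: A's loop re-expressed with an explicit current-segment accumulator
def segB_step (sep : List String)
    (st : List (List String) × List String) (w : String) : List (List String) × List String :=
  if sep.contains w then
    (if st.2 ≠ [] then st.1 ++ [st.2] else st.1, [])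
  else (st.1, st.2 ++ [w])

theorem slice_prefix (fp rest : List String) (p : Nat) (h : p ≤ fp.length) :
    PySem.List.slice (fp ++ rest) (some (p : Int)) (some (fp.length : Int)) = fp.drop p := by
  rw [PySem.List.slice_natCast]
  rw [List.drop_append_of_le_length h]
  simp

theorem drop_ne_nil_iff (fp : List String) (p : Nat) (h : p ≤ fp.length) :
    (fp.drop p ≠ []) ↔ p ≠ fp.length := by
  constructor
  · intro hne heq; exact hne (by simp [heq])
  · intro hne hnil
    have := congrArg List.length hnil
    simp [List.length_drop] at this
    omega

-- A's fold from index fp.length with start index p equals the cur-fold with segment fp.drop p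
theorem loop_eq (sep : List String) :
    ∀ (rest fp : List String) (p : Nat) (segs : List (List String)), p ≤ fp.length →
      ((rest.zipIdx fp.length).foldl (segA_step (fp ++ rest) sep) (segs, p)).1
        = (rest.foldl (segB_step sep) (segs, fp.drop p)).1 := by
  intro rest
  induction rest with
  | nil => intro fp p segs _; simp
  | cons w rest' ih =>
    intro fp p segs hp
    rw [List.zipIdx_cons, List.foldl_cons, List.foldl_cons]
    show ((rest'.zipIdx (fp.length + 1)).foldl (segA_step (fp ++ w :: rest') sep)
      (segA_step (fp ++ w :: rest') sep (segs, p) (w, fp.length))).1 = _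
    have hw : fp ++ w :: rest' = (fp ++ [w]) ++ rest' := by simp
    have hlen : fp.length + 1 = (fp ++ [w]).length := by simp
    by_cases hs : sep.contains w
    · have hm : w ∈ sep := by simpa using hs
      have hA : segA_step (fp ++ w :: rest') sep (segs, p) (w, fp.length)
          = ((if fp.drop p ≠ [] then segs ++ [fp.drop p] else segs), fp.length + 1) := by
        simp only [segA_step, hs, if_true]
        rw [slice_prefix fp (w :: rest') p hp]
        congr 1
        simp only [drop_ne_nil_iff fp p hp]
      rw [hA, hw, hlen, ih (fp ++ [w]) (fp ++ [w]).length _ (le_refl _)]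
      simp [segB_step, hm]
    · have hm : w ∉ sep := by simpa using hs
      have hA : segA_step (fp ++ w :: rest') sep (segs, p) (w, fp.length) = (segs, p) := by
        simp [segA_step, hm]
      rw [hA, hw, hlen, ih (fp ++ [w]) p segs (by simpa using Nat.le_succ_of_le hp)]
      simp [segB_step, hm, List.drop_append_of_le_length hp]

-- one outer-iteration step of the cur-fold, phrased through segHi
theorem fold_step (words seps : List String) :
    ∀ (m lo : Nat) (segs : List (List String)) (cur : List String),
      words.length - lo ≤ m → lo ≤ words.length →
      ((words.drop lo).foldl (segB_step seps) (segs, cur)).1 =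
        (if segHi words seps words.length lo < words.length then
          ((words.drop (segHi words seps words.length lo + 1)).foldl (segB_step seps)
            ((if cur ++ ((words.take (segHi words seps words.length lo)).drop lo) ≠ []
              then segs ++ [cur ++ ((words.take (segHi words seps words.length lo)).drop lo)] else segs), [])).1
         else segs) := by
  intro m
  induction m with
  | zero =>
    intro lo segs cur hm hle
    have hlo : lo = words.length := by omega
    have hhi : segHi words seps words.length lo = lo := segHi_stop words seps lo (Or.inr (by omega)) words.length
    rw [hhi, hlo]
    simp
  | succ m ih =>
    intro lo segs cur hm hle
    by_cases hlt : lo < words.length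
    · have hdrop : words.drop lo = words.getD lo "" :: words.drop (lo + 1) := by
        rw [List.getD_eq_getElem words "" hlt, ← List.getElem_cons_drop hlt]
      by_cases hsep : seps.contains (words.getD lo "")
      · -- separator at lo: segHi stops here
        have hhi : segHi words seps words.length lo = lo := segHi_stop words seps lo (Or.inl hsep) words.length
        rw [hdrop, List.foldl_cons]
        have hstep : segB_step seps (segs, cur) (words.getD lo "")
            = ((if cur ≠ [] then segs ++ [cur] else segs), []) := by
          simp only [segB_step, hsep, if_true]
        rw [hstep, hhi]
        simp only [hlt, if_pos]
        have : (words.take lo).drop lo = [] := by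
          simp
        rw [this]
        simp
      · -- non-separator at lo: segHi advances, cur grows
        have hhi : segHi words seps words.length lo = segHi words seps words.length (lo + 1) :=
          segHi_go words seps lo hlt hsep
        rw [hdrop, List.foldl_cons]
        have hstep : segB_step seps (segs, cur) (words.getD lo "")
            = (segs, cur ++ [words.getD lo ""]) := by
          simp only [segB_step, hsep]
          simp
        rw [hstep, ih (lo + 1) segs (cur ++ [words.getD lo ""]) (by omega) (by omega), hhi]
        have hge : lo + 1 ≤ segHi words seps words.length (lo + 1) := segHi_ge words seps words.length (lo + 1)
        have hle' : segHi words seps words.length (lo + 1) ≤ words.length :=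
          segHi_le words seps words.length (lo + 1) (by omega)
        have hmid : (words.take (segHi words seps words.length (lo + 1))).drop lo
            = words.getD lo "" :: (words.take (segHi words seps words.length (lo + 1))).drop (lo + 1) := by
          have hlt' : lo < (words.take (segHi words seps words.length (lo + 1))).length := by
            simp [List.length_take]; omega
          rw [← List.getElem_cons_drop hlt']
          congr 1
          rw [List.getElem_take, List.getD_eq_getElem words "" hlt]
        rw [hmid]
        simp
    · have hlo : lo = words.length := by omega
      have hhi : segHi words seps words.length lo = lo := segHi_stop words seps lo (Or.inr (by omega)) words.length
      rw [hhi, hlo]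
      simp

-- the cur-fold with empty current segment equals B's two-pointer outer loop (given enough fuel)
theorem fold_out (words seps : List String) :
    ∀ (fuel lo : Nat) (segs : List (List String)),
      words.length - lo < fuel → lo ≤ words.length →
      ((words.drop lo).foldl (segB_step seps) (segs, [])).1 = segOut words seps fuel segs lo := by
  intro fuel
  induction fuel with
  | zero => intro lo segs hm hle; omega
  | succ m ih =>
    intro lo segs hm hle
    by_cases hlt : lo < words.length
    · have hge : lo ≤ segHi words seps words.length lo := segHi_ge words seps words.length lo
      have hle' : segHi words seps words.length lo ≤ words.length := segHi_le words seps words.length lo (by omega)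
      rw [fold_step words seps (words.length - lo) lo segs [] (by omega) hle]
      rw [segOut]
      simp only [hlt, if_pos]
      by_cases hendcase : segHi words seps words.length lo = words.length
      · simp [hendcase]
      · have hhlt : segHi words seps words.length lo < words.length := by omega
        rw [if_neg hendcase, if_pos hhlt]
        rw [ih (segHi words seps words.length lo + 1) _ (by omega) (by omega)]
        congr 1
        simp only [List.nil_append]
        have hlen : ((words.take (segHi words seps words.length lo)).drop lo).length
            = segHi words seps words.length lo - lo := by
          simp [List.length_drop, List.length_take]; omega
        have hne : ((words.take (segHi words seps words.length lo)).drop lo ≠ []) ↔ lo < segHi words seps words.length lo := by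
          rw [← List.length_pos_iff, hlen]; omega
        by_cases hlo' : lo < segHi words seps words.length lo
        · rw [if_pos (hne.mpr hlo'), if_pos hlo', PySem.List.slice_natCast, List.drop_take]
        · simp only [hlo', if_false]
          rw [if_neg (by simpa [hne] using hlo')]
    · have hlo : lo = words.length := by omega
      rw [segOut]
      simp [hlo]

-- ===== VERDICT (by name: the statement is the Claim_ definition above) =====
theorem seg_list_py_spec : Claim_equal_seg_list_py := by
  intro words sep _
  show seg_list_py words sep = seg_list_py_alt words sep
  have h1 := loop_eq sep words [] 0 [] (by simp)
  have hc : ∀ w : String, List.contains (PySem.Set.ofList sep) w = List.contains sep w := by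
    intro w
    rw [Bool.eq_iff_iff]
    simp [PySem.Set.mem_ofList]
  have hfun : segB_step (PySem.Set.ofList sep) = segB_step sep := by
    funext st w
    simp only [segB_step]
    rw [hc w]
  have h3 := fold_out words (PySem.Set.ofList sep) (words.length + 1) 0 [] (by omega) (by omega)
  simp only [seg_list_py, seg_list_py_alt]
  rw [show words.zipIdx = words.zipIdx ([] : List String).length from rfl] at *
  calc ((words.zipIdx ([] : List String).length).foldl (segA_step words sep) ([], 0)).1
      = ((words.zipIdx ([] : List String).length).foldl (segA_step (([] : List String) ++ words) sep) ([], 0)).1 := by simp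
    _ = (words.foldl (segB_step sep) ([], ([] : List String).drop 0)).1 := h1
    _ = (words.foldl (segB_step (PySem.Set.ofList sep)) ([], [])).1 := by
          simp only [List.drop_nil, hfun]
    _ = segOut words (PySem.Set.ofList sep) (words.length + 1) [] 0 := by
          simpa using h3
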